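-- pv_equiv track=rewrite | github.com/Noah-C-S/AoC2020 | day21/day21.py | getCommonIngredients
-- ===== SOURCE A (Python) =====
-- import copy
--
-- def getCommonIngredients(theFoods):
--     common = theFoods[0][1]
--     for food in theFoods:
--         for ingredient in common:
--             newCommon = copy.deepcopy(common)
--             if(ingredient not in food[1]):
--                 newCommon.remove(ingredient)
--             common = newCommon
--     return common
-- ===== SOURCE B (Python) =====
-- def getCommonIngredients(theFoods):
--     # Count, for each ingredient, how many foods contain it (each food counted once
--     # via a per-food set), then keep the first food's ingredients found in all foods.
--     counts = {}
--     for food in theFoods: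
--         for ing in set(food[1]):
--             counts[ing] = counts.get(ing, 0) + 1
--     n = len(theFoods)
--     return [ing for ing in theFoods[0][1] if counts.get(ing) == n]
-- ===== Notes on version B (the rewrite author's own statement) =====
-- stated objective: alternative
-- what changed: Replaces A's per-food deep-copy-and-remove pruning of the running list with a single counting pass (ingredient -> number of foods containing it) followed by one filter of the first food's ingredient list.
import Mathlib
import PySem

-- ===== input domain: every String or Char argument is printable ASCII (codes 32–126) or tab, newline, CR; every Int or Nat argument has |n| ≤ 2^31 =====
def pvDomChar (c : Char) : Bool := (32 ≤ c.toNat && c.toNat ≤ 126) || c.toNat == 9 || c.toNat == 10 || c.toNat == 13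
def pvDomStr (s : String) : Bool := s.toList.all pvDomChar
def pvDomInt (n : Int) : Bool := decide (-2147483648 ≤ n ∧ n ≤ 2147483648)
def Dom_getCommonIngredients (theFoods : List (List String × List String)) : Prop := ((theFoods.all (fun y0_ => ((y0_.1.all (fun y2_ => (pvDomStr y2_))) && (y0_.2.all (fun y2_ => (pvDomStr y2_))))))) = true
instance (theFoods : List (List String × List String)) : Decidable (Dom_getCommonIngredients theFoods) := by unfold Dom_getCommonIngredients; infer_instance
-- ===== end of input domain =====

-- B replaces A's repeated deep-copy-and-remove pruning by one counting pass over all foods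
-- followed by a single filter of the first food's ingredient list (objective: alternative).


-- ===== PORT A =====
-- common = theFoods[0][1]; for food: for ingredient in common (the snapshot bound at loop
-- entry): deepcopy, conditional remove. list.remove's ValueError is unreachable here (each
-- occurrence of the snapshot is removed at most once), so remove? is getD'd on the
-- unchanged list; the getD default is never used.
def getCommonIngredients (theFoods : List (List String × List String)) : List String :=
  let common0 : List String :=
    match PySem.List.pyGet? theFoods 0 with
    | some f => f.2
    | none => []                      -- IndexError: outside Pre_
  theFoods.foldl (fun common food =>
      common.foldl (fun c ingredient =>
          let newCommon := c          -- deepcopy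
          if (food.2.contains ingredient) = false then
            (PySem.List.remove? newCommon ingredient).getD newCommon
          else newCommon)
        common)
    common0

-- ===== PORT B =====
def getCommonIngredients_alt (theFoods : List (List String × List String)) : List String :=
  let counts : PySem.Dict String Int :=
    theFoods.foldl (fun d food =>
        (PySem.Set.ofList food.2).foldl (fun d2 ing => d2.insert ing (d2.getD ing 0 + 1)) d)
      PySem.Dict.empty
  let n : Int := theFoods.length
  let first : List String :=
    match PySem.List.pyGet? theFoods 0 with
    | some f => f.2
    | none => []                      -- IndexError: outside Pre_
  first.filter (fun ing => counts.get? ing == some n)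

-- ===== PRECONDITION & SPEC =====
-- Pre_ excludes only the empty food list, on which A ('theFoods[0]') raises IndexError.
def Pre_getCommonIngredients (theFoods : List (List String × List String)) : Prop :=
  theFoods ≠ []
instance (theFoods : List (List String × List String)) : Decidable (Pre_getCommonIngredients theFoods) := by unfold Pre_getCommonIngredients; infer_instance

def pvWitness_getCommonIngredients : (List (List String × List String)) :=
  [(["dairy"], ["a", "b"]), ([], ["b", "c", "b"])]

def Spec_getCommonIngredients (theFoods : List (List String × List String)) (out : List String) : Prop := out = getCommonIngredients_alt theFoods
instance (theFoods : List (List String × List String)) (out : List String) : Decidable (Spec_getCommonIngredients theFoods out) := by unfold Spec_getCommonIngredients; infer_instance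

-- ===== CLAIM (what is proved, stated in full; the proofs are below) =====
def Claim_equal_getCommonIngredients : Prop := ∀ (theFoods : List (List String × List String)), Dom_getCommonIngredients theFoods → Pre_getCommonIngredients theFoods → Spec_getCommonIngredients theFoods (getCommonIngredients theFoods)

-- ===== LEMMAS AND PROOFS =====

-- A's inner loop over the snapshot is a filter: invariant "accumulator = s.filter p ++ rest".
theorem innerA_invariant (p : String → Bool) (r : List String) :
    ∀ s : List String,
      r.foldl (fun c ing =>
          if (p ing) = false then (PySem.List.remove? c ing).getD c else c)
        (s.filter p ++ r) = (s ++ r).filter p := by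
  induction r with
  | nil => intro s; simp
  | cons a t ih =>
    intro s
    simp only [List.foldl_cons]
    by_cases hpa : p a = true
    · have h2 : (s.filter p ++ a :: t : List String) = (s ++ [a]).filter p ++ t := by
        simp [List.filter_append, hpa]
      rw [if_neg (by simp [hpa]), h2, ih (s ++ [a])]
      simp
    · have hpa' : p a = false := by simpa using hpa
      have hmem : a ∈ s.filter p ++ a :: t := by simp
      have hnm : a ∉ s.filter p := by
        intro h; have := List.of_mem_filter h; simp [hpa'] at this
      have herase : (s.filter p ++ a :: t).erase a = s.filter p ++ t := by
        rw [List.erase_append_right _ hnm, List.erase_cons_head]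
      rw [if_pos hpa', PySem.List.remove?_eq_some_erase _ _ hmem]
      have h2 : (s.filter p ++ t : List String) = (s ++ [a]).filter p ++ t := by
        simp [List.filter_append, hpa']
      rw [Option.getD_some, herase, h2, ih (s ++ [a])]
      simp

-- One food pass of A filters the running list by membership in that food.
theorem innerA_eq_filter (p : String → Bool) (c : List String) :
    c.foldl (fun acc ing =>
        if (p ing) = false then (PySem.List.remove? acc ing).getD acc else acc) c
      = c.filter p := by
  simpa using innerA_invariant p c []

-- The whole of A filters the initial list by membership in every food.
theorem outerA_eq_filter (fs : List (List String × List String)) :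
    ∀ c : List String,
      fs.foldl (fun common food =>
          common.foldl (fun acc ing =>
              if (food.2.contains ing) = false then
                (PySem.List.remove? acc ing).getD acc
              else acc) common) c
        = c.filter (fun ing => fs.all (fun f => f.2.contains ing)) := by
  induction fs with
  | nil => intro c; simp
  | cons f t ih =>
    intro c
    simp only [List.foldl_cons]
    rw [innerA_eq_filter, ih, List.filter_filter]
    apply List.filter_congr
    intro x _; simp [Bool.and_comm]

-- B's counter: the stored count of an ingredient is the number of foods containing it.
theorem countsB_getD (fs : List (List String × List String)) :
    ∀ (d : PySem.Dict String Int) (ing : String),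
      (fs.foldl (fun d food =>
          (PySem.Set.ofList food.2).foldl
            (fun d2 x => d2.insert x (d2.getD x 0 + 1)) d) d).getD ing 0
        = d.getD ing 0 + (fs.countP (fun f => f.2.contains ing) : Int) := by
  induction fs with
  | nil => intro d ing; simp
  | cons f t ih =>
    intro d ing
    simp only [List.foldl_cons]
    rw [ih, PySem.Dict.getD_foldl_insert_add_one]
    have hcnt : (PySem.Set.ofList f.2).count ing
        = (if f.2.contains ing then 1 else 0) := by
      by_cases hm : ing ∈ f.2
      · rw [List.count_eq_one_of_mem (PySem.Set.nodup_ofList f.2)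
            ((PySem.Set.mem_ofList f.2 ing).mpr hm)]
        simp [hm]
      · rw [List.count_eq_zero_of_not_mem
            (fun h => hm ((PySem.Set.mem_ofList f.2 ing).mp h))]
        simp [hm]
    rw [List.countP_cons, hcnt]
    by_cases hf : f.2.contains ing = true
    · simp only [hf, if_true]; omega
    · simp only [hf, Bool.false_eq_true, if_false]; omega

-- B's filter test agrees with "contained in every food" on a nonempty food list.
theorem predB_eq_all (fs : List (List String × List String)) (hne : fs ≠ [])
    (ing : String) :
    ((fs.foldl (fun d food =>
        (PySem.Set.ofList food.2).foldl
          (fun d2 x => d2.insert x (d2.getD x 0 + 1)) d)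
        (PySem.Dict.empty : PySem.Dict String Int)).get? ing
      == some (fs.length : Int))
      = fs.all (fun f => f.2.contains ing) := by
  have hgetD := countsB_getD fs (PySem.Dict.empty : PySem.Dict String Int) ing
  rw [PySem.Dict.getD_empty] at hgetD
  set counts := fs.foldl (fun d food =>
      (PySem.Set.ofList food.2).foldl
        (fun d2 x => d2.insert x (d2.getD x 0 + 1)) d)
    (PySem.Dict.empty : PySem.Dict String Int) with hc
  have hlen : 0 < fs.length := List.length_pos_iff.mpr hne
  cases hopt : counts.get? ing with
  | none =>
    have h0 : counts.getD ing 0 = 0 := by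
      rw [PySem.Dict.getD_eq_get?_getD, hopt]; rfl
    have hcnt0 : fs.countP (fun f => f.2.contains ing) = 0 := by
      rw [h0] at hgetD; omega
    have hex : ∃ f ∈ fs, ¬ (f.2.contains ing = true) := by
      rcases List.exists_mem_of_ne_nil fs hne with ⟨f, hf⟩
      exact ⟨f, hf, by
        have := List.countP_eq_zero.mp hcnt0 f hf
        simpa using this⟩
    rcases hex with ⟨f, hf, hnf⟩
    have hall : fs.all (fun f => f.2.contains ing) = false := by
      rw [List.all_eq_false]; exact ⟨f, hf, by simpa using hnf⟩
    rw [hall]; rfl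
  | some v =>
    have hv : v = (fs.countP (fun f => f.2.contains ing) : Int) := by
      have hg : counts.getD ing 0 = v := by
        rw [PySem.Dict.getD_eq_get?_getD, hopt]; rfl
      rw [hg] at hgetD; simpa using hgetD
    have hiff : (fs.countP (fun f => f.2.contains ing) = fs.length)
        ↔ fs.all (fun f => f.2.contains ing) = true := by
      rw [List.all_eq_true]
      constructor
      · intro h x hx; exact List.countP_eq_length.mp h x hx
      · intro h; exact List.countP_eq_length.mpr h
    by_cases hall : fs.all (fun f => f.2.contains ing) = true
    · have hvn : v = (fs.length : Int) := by
        rw [hv]; exact_mod_cast hiff.mpr hall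
      rw [hall, hvn]; simp
    · have hallf : fs.all (fun f => f.2.contains ing) = false := by
        simpa using hall
      have hne' : fs.countP (fun f => f.2.contains ing) ≠ fs.length := by
        intro h; exact hall (hiff.mp h)
      have hvn : v ≠ (fs.length : Int) := by
        rw [hv]; exact_mod_cast hne'
      rw [hallf]; simp [hvn]

-- ===== VERDICT (by name: the statement is the Claim_ definition above) =====
theorem getCommonIngredients_spec : Claim_equal_getCommonIngredients := by
  intro theFoods _ hpre
  unfold Spec_getCommonIngredients getCommonIngredients getCommonIngredients_alt
  simp only []
  rw [outerA_eq_filter]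
  apply List.filter_congr
  intro x _
  exact (predB_eq_all theFoods hpre x).symm
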